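-- pv_equiv track=rewrite | github.com/maxg56/DM_programmation | code_secret/code_secret.py | code_secret
-- ===== SOURCE A (Python) =====
-- def code_secret(message):
--     """Renvoie le code secret caché dans la liste de chaînes"""
--     code_total = 1  # Initialisez à 1 pour pouvoir multiplier
--     for mau in message:
--         premier_chiffre, dernier_chiffre = None, None  # Initialisez à None
--         for i in range(len(mau)):
--             if mau[i].isdigit():
--                 if premier_chiffre is None:
--                     premier_chiffre = mau[i]
--                 dernier_chiffre = mau[i]
--
--         if premier_chiffre is not None and dernier_chiffre is not None:
--             code_total *= int(premier_chiffre + dernier_chiffre)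
--
--     return code_total
-- ===== SOURCE B (Python) =====
-- def code_secret(message):
--     """Renvoie le code secret caché dans la liste de chaînes"""
--     code_total = 1
--     for mau in message:
--         first = next((c for c in mau if c.isdigit()), None)
--         last = next((c for c in reversed(mau) if c.isdigit()), None)
--         if first is not None:
--             code_total *= int(first + last)
--     return code_total
-- ===== Notes on version B (the rewrite author's own statement) =====
-- stated objective: idiomatic
-- what changed: Replaces the single sentinel-tracking index loop over each string with two directed searches: a forward generator for the first digit and a backward one over reversed(mau) for the last digit.
import Mathlib
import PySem

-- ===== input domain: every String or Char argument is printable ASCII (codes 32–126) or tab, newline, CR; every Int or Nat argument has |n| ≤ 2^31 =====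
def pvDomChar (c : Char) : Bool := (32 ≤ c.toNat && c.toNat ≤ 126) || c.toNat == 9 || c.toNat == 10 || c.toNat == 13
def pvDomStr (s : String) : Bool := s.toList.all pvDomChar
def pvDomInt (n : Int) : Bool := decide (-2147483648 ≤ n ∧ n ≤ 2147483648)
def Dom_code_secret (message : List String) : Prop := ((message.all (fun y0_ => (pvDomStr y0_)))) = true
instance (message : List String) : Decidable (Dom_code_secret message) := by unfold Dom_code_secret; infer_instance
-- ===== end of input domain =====

-- B replaces A's single sentinel-tracking index loop per string by two directed searches
-- (forward find? for the first digit, find? on the reversed string for the last); idiomatic, same cost.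

-- ===== PORT A =====
-- c.isdigit() for a single char; exact on the printable-ASCII domain
def digitA (c : Char) : Bool := '0' ≤ c && c ≤ '9'

-- int(premier + dernier) for two ASCII digit chars; exact since both chars are '0'-'9'
def twoDigitA (f l : Char) : Int := 10 * ((f.toNat : Int) - 48) + ((l.toNat : Int) - 48)

-- one pass per string keeping (premier_chiffre, dernier_chiffre) as the loop state
def stepA (st : Option Char × Option Char) (c : Char) : Option Char × Option Char :=
  if digitA c then
    (match st.1 with | none => some c | some a => some a, some c)
  else st

def code_secret (message : List String) : Int :=
  message.foldl (fun acc mau =>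
    match mau.toList.foldl stepA (none, none) with
    | (some f, some l) => acc * twoDigitA f l
    | _ => acc) 1

-- ===== PORT B =====
-- c.isdigit() for a single char; exact on the printable-ASCII domain
def digitB (c : Char) : Bool := '0' ≤ c && c ≤ '9'

-- int(first + last) for two ASCII digit chars; exact since both chars are '0'-'9'
def twoDigitB (f l : Char) : Int := 10 * ((f.toNat : Int) - 48) + ((l.toNat : Int) - 48)

def code_secret_alt (message : List String) : Int :=
  message.foldl (fun acc mau =>
    match mau.toList.find? digitB with
    | none => acc                       -- no digit: skip
    | some f =>                         -- 'if first is not None'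
      match mau.toList.reverse.find? digitB with
      | some l => acc * twoDigitB f l
      | none => acc) 1                  -- unreachable: a digit found forward exists backward

-- ===== PRECONDITION & SPEC =====
def Spec_code_secret (message : List String) (out : Int) : Prop := out = code_secret_alt message
instance (message : List String) (out : Int) : Decidable (Spec_code_secret message out) := by unfold Spec_code_secret; infer_instance

-- ===== CLAIM (what is proved, stated in full; the proofs are below) =====
def Claim_equal_code_secret : Prop := ∀ (message : List String), Dom_code_secret message → Spec_code_secret message (code_secret message)

-- ===== LEMMAS AND PROOFS =====

theorem scan_eq (cs : List Char) : ∀ f l : Option Char,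
    cs.foldl stepA (f, l) =
      (f.orElse (fun _ => cs.find? digitA),
       (cs.reverse.find? digitA).orElse (fun _ => l)) := by
  induction cs with
  | nil => intro f l; cases f <;> cases l <;> simp [Option.orElse]
  | cons c cs ih =>
    intro f l
    by_cases h : digitA c = true
    · simp only [List.foldl_cons, stepA, h, if_pos]
      rw [ih]
      simp [h, List.find?_append, Option.orElse]
      cases f <;> cases cs.reverse.find? digitA <;> simp
    · simp only [List.foldl_cons, stepA, h, if_neg, Bool.not_eq_true]
      rw [ih]
      simp [h, List.find?_append, Option.orElse]

theorem elem_eq (acc : Int) (mau : String) :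
    (match mau.toList.foldl stepA (none, none) with
     | (some f, some l) => acc * twoDigitA f l
     | _ => acc) =
    (match mau.toList.find? digitA with
     | none => acc
     | some f =>
       match mau.toList.reverse.find? digitA with
       | some l => acc * twoDigitA f l
       | none => acc) := by
  rw [scan_eq]
  cases mau.toList.find? digitA <;> cases mau.toList.reverse.find? digitA <;>
    simp [Option.orElse]

theorem fold_eq (message : List String) : ∀ acc : Int,
    message.foldl (fun acc mau =>
      match mau.toList.foldl stepA (none, none) with
      | (some f, some l) => acc * twoDigitA f l
      | _ => acc) acc =
    message.foldl (fun acc mau =>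
      match mau.toList.find? digitA with
      | none => acc
      | some f =>
        match mau.toList.reverse.find? digitA with
        | some l => acc * twoDigitA f l
        | none => acc) acc := by
  induction message with
  | nil => intro acc; rfl
  | cons mau rest ih =>
    intro acc
    simp only [List.foldl_cons]
    rw [elem_eq, ih]

-- ===== VERDICT (by name: the statement is the Claim_ definition above) =====
theorem code_secret_spec : Claim_equal_code_secret := by
  intro message _
  unfold Spec_code_secret code_secret code_secret_alt
  exact fold_eq message 1
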